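-- pv_equiv track=rewrite | github.com/hilliao/enterprise-solutions | pyPlay/main.py | count
-- ===== SOURCE A (Python) =====
-- def count(s):
--     indexRange = range(len(s))
--     countMirrored = 0
--     for start in indexRange:
--         if start == len(s) - 1:
--             continue;
--
--         for end in indexRange[start + 1:-1]:
--             binaryMirroredCandidate = s[start:end + 1]
--             i = 0
--             j = len(binaryMirroredCandidate) - 1
--             binaryMirrored = True
--             while (i < j):
--                 if binaryMirroredCandidate[i] == binaryMirroredCandidate[j]:
--                     binaryMirrored = False
--                 i += 1
--                 j -= 1
--             if binaryMirrored:
--                 countMirrored += 1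
--     return countMirrored
-- ===== SOURCE B (Python) =====
-- def count(s):
--     # Bottom-up DP over substring lengths of t = s[:-1]: a substring is
--     # "anti-palindromic" iff its outer chars differ and its core (2 shorter) is.
--     t = s[:-1]
--     n = len(t)
--     total = 0
--     pp = [True] * (n + 1)   # lengths 0 (vacuously anti), indexed by start
--     p = [True] * n          # length 1 (vacuously anti)
--     for L in range(2, n + 1):
--         cur = [t[a] != t[a + L - 1] and pp[a + 1] for a in range(n - L + 1)]
--         total += sum(cur)
--         pp, p = p, cur
--     return total
-- ===== Notes on version B (the rewrite author's own statement) =====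
-- stated objective: faster
-- what changed: A re-checks every substring from scratch with an inner mirror-scan (cubic); B runs a bottom-up DP over substring lengths of s[:-1], deriving each length-L anti-palindrome flag from the length-(L-2) flag two rows earlier, summing flags per row.
import Mathlib
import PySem

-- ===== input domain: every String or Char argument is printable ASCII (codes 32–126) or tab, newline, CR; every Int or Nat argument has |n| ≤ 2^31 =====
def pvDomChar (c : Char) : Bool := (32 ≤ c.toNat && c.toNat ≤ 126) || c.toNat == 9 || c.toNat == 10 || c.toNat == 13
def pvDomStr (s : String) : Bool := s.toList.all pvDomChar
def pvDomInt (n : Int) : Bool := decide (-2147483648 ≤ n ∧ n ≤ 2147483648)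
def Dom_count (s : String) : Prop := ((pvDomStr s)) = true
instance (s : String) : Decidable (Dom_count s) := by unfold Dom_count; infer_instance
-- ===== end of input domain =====

-- B replaces A's cubic scan (re-checking every substring from scratch) by a quadratic
-- bottom-up DP over substring lengths of s[:-1] (objective: faster).

-- ===== PORT A =====
-- the 'while i < j' flag loop of A, step for step
def mirrorLoop (cand : List Char) (i j : Int) (flag : Bool) : Bool :=
  if i < j then
    mirrorLoop cand (i + 1) (j - 1)
      (if PySem.List.pyGet? cand i == PySem.List.pyGet? cand j then false else flag)
  else flag
termination_by (j - i).toNat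
decreasing_by omega

def count (s : String) : Int :=
  let cs := s.toList
  let n : Int := cs.length
  let indexRange := PySem.List.pyRange 0 n 1
  indexRange.foldl (fun cnt start =>
    if start == n - 1 then cnt
    else
      (PySem.List.slice indexRange (some (start + 1)) (some (-1))).foldl (fun cnt e =>
        let cand := PySem.List.slice cs (some start) (some (e + 1))
        let binaryMirrored := mirrorLoop cand 0 ((cand.length : Int) - 1) true
        if binaryMirrored then cnt + 1 else cnt) cnt) 0

-- ===== PORT B =====
def count_alt (s : String) : Int :=
  let t := PySem.List.slice s.toList none (some (-1))
  let n := t.length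
  let pp : List Bool := List.replicate (n + 1) true
  let p : List Bool := List.replicate n true
  let res := (PySem.List.pyRange 2 ((n : Int) + 1) 1).foldl
    (fun (st : Int × List Bool × List Bool) L =>
      let cur := (PySem.List.pyRange 0 ((n : Int) - L + 1) 1).map (fun a =>
        (PySem.List.pyGetD t a ' ' != PySem.List.pyGetD t (a + L - 1) ' ')
          && PySem.List.pyGetD st.2.1 (a + 1) true)
      (st.1 + (cur.map (fun b => if b then (1 : Int) else 0)).sum, st.2.2, cur))
    (0, pp, p)
  res.1

-- ===== PRECONDITION & SPEC =====
def Spec_count (s : String) (out : Int) : Prop := out = count_alt s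
instance (s : String) (out : Int) : Decidable (Spec_count s out) := by unfold Spec_count; infer_instance

-- ===== CLAIM (what is proved, stated in full; the proofs are below) =====
def Claim_equal_count : Prop := ∀ (s : String), Dom_count s → Spec_count s (count s)

-- ===== LEMMAS AND PROOFS =====

-- all symmetric pairs of the slice l[a..b] differ
def Anti (l : List Char) (a b : Nat) : Bool :=
  decide (∀ k < b, a + k < b - k → l[a + k]? ≠ l[b - k]?)

theorem anti_iff (l : List Char) (a b : Nat) :
    Anti l a b = true ↔ ∀ k < b, a + k < b - k → l[a + k]? ≠ l[b - k]? := by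
  simp [Anti]

def aind (b : Bool) : Int := if b then 1 else 0

theorem mirrorLoop_iff (cand : List Char) (i j : Int) (flag : Bool) :
    mirrorLoop cand i j flag = true ↔
      (flag = true ∧ ∀ k : Nat, i + k < j - k →
        PySem.List.pyGet? cand (i + k) ≠ PySem.List.pyGet? cand (j - k)) := by
  induction i, j, flag using mirrorLoop.induct (cand := cand) with
  | case2 i j flag hij =>
    rw [mirrorLoop]
    simp only [if_neg hij]
    constructor
    · intro h; exact ⟨h, fun k hk => absurd hk (by omega)⟩
    · exact fun h => h.1
  | case1 i j flag hij ih =>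
    rw [mirrorLoop, if_pos hij]
    simp only [dite_eq_ite] at ih
    rw [ih]
    by_cases heq : PySem.List.pyGet? cand i == PySem.List.pyGet? cand j
    · simp only [if_pos heq]
      constructor
      · simp
      · rintro ⟨-, h⟩
        have h0 := h 0 (by push_cast; omega)
        simp only [Nat.cast_zero, add_zero, sub_zero] at h0
        exact absurd (beq_iff_eq.mp heq) h0
    · simp only [if_neg heq]
      constructor
      · rintro ⟨hf, h⟩
        refine ⟨hf, fun k hk => ?_⟩
        match k with
        | 0 => simpa using (fun e => heq (beq_iff_eq.mpr (by simpa using e)))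
        | Nat.succ m =>
          have := h m (by push_cast at hk ⊢; omega)
          have e1 : i + (↑(m+1) : Int) = i + 1 + m := by push_cast; ring
          have e2 : j - (↑(m+1) : Int) = j - 1 - m := by push_cast; ring
          rw [e1, e2]; exact this
      · rintro ⟨hf, h⟩
        refine ⟨hf, fun k hk => ?_⟩
        have := h (k+1) (by push_cast at hk ⊢; omega)
        have e1 : i + ((k:Int)+1) = i + 1 + k := by ring
        have e2 : j - ((k:Int)+1) = j - 1 - k := by ring
        push_cast at this
        rw [e1, e2] at this; exact this

theorem anti_dropLast (l : List Char) (a b : Nat) (hb : b + 1 < l.length) :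
    Anti l.dropLast a b = Anti l a b := by
  unfold Anti
  rw [decide_eq_decide]
  refine forall₂_congr (fun k hk => ?_)
  refine imp_congr_right (fun hlt => ?_)
  rw [List.getElem?_dropLast, List.getElem?_dropLast, if_pos (by omega), if_pos (by omega)]

theorem cand_mirror (cs : List Char) (s e : Nat) (hse : s ≤ e) (he : e < cs.length) :
    (mirrorLoop (List.take (e + 1 - s) (List.drop s cs)) 0
      (((List.take (e + 1 - s) (List.drop s cs)).length : Int) - 1) true = true) ↔ Anti cs s e = true := by
  rw [anti_iff]
  set cand := List.take (e + 1 - s) (List.drop s cs) with hcand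
  have hlen : cand.length = e + 1 - s := by
    simp [hcand]; omega
  have hget : ∀ k : Nat, k < e + 1 - s → cand[k]? = cs[s + k]? := by
    intro k hk
    rw [hcand, List.getElem?_take, if_pos hk, List.getElem?_drop]
  rw [mirrorLoop_iff, hlen]
  simp only [true_and]
  have e1 : ∀ k : Nat, (0 : Int) + (k : Int) = ((k : Nat) : Int) := by intro k; ring
  have e2 : ∀ k : Nat, k ≤ e - s → ((e + 1 - s : Nat) : Int) - 1 - (k : Int) = ((e - s - k : Nat) : Int) := by
    intro k hk; omega
  have e3 : ∀ k : Nat, k ≤ e - s → s + (e - s - k) = e - k := by intro k hk; omega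
  constructor
  · intro h k hk hlt
    have hcond : (0 : Int) + (k : Int) < ((e + 1 - s : Nat) : Int) - 1 - (k : Int) := by omega
    have hh := h k hcond
    rw [e1 k, e2 k (by omega), PySem.List.pyGet?_natCast, PySem.List.pyGet?_natCast,
        hget k (by omega), hget (e - s - k) (by omega), e3 k (by omega)] at hh
    exact hh
  · intro h k hcond
    have hk2 : s + k < e - k := by omega
    have hh := h k (by omega) hk2
    rw [e1 k, e2 k (by omega), PySem.List.pyGet?_natCast, PySem.List.pyGet?_natCast,
        hget k (by omega), hget (e - s - k) (by omega), e3 k (by omega)]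
    exact hh

theorem slice_nat_neg_one {α : Type} (xs : List α) (m : Nat) :
    PySem.List.slice xs (some (m : Int)) (some (-1))
      = (xs.drop (min m xs.length)).take (xs.length - 1 - min m xs.length) := by
  simp [PySem.List.slice]

theorem slice_range_neg_one (n a : Nat) :
    PySem.List.slice (PySem.List.pyRange 0 (n : Int) 1) (some ((a : Int) + 1)) (some (-1))
      = (List.range (n - 1 - (a + 1))).map (fun k => ((a + 1 + k : Nat) : Int)) := by
  have hc : ((a : Int) + 1) = ((a + 1 : Nat) : Int) := by push_cast; ring
  rw [hc, slice_nat_neg_one, PySem.List.pyRange_zero_nat]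
  apply List.ext_getElem
  · simp
    omega
  · intro i h1 h2
    simp only [List.getElem_take, List.getElem_drop, List.getElem_map, List.getElem_range]
    push_cast
    simp only [List.length_map, List.length_range] at h1 h2 ⊢
    congr 1
    omega

def G (cs : List Char) (a : Nat) : Int :=
  ∑ k ∈ Finset.range (cs.length - 1 - (a + 1)), aind (Anti cs a (a + 1 + k))

theorem count_eq_G (s : String) :
    count s = ∑ a ∈ Finset.range s.toList.length, G s.toList a := by
  simp only [count]
  set cs := s.toList with hcs
  rw [PySem.List.pyRange_zero_nat, List.foldl_map]
  refine Eq.trans (PySem.List.foldl_congr_mem _ _ (fun (acc : Int) (x : Nat) => acc + G cs x) _ ?_) ?_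
  · intro acc x hx
    rw [List.mem_range] at hx
    dsimp only
    rw [← PySem.List.pyRange_zero_nat]
    by_cases hxe : (x : Int) = (cs.length : Int) - 1
    · rw [if_pos (beq_iff_eq.mpr hxe)]
      have h0 : cs.length - 1 - (x + 1) = 0 := by omega
      rw [G, h0]
      simp
    · rw [if_neg (by simpa using hxe)]
      rw [slice_range_neg_one cs.length x, List.foldl_map]
      refine Eq.trans (PySem.List.foldl_congr_mem _ _
        (fun (acc2 : Int) (k : Nat) => acc2 + aind (Anti cs x (x + 1 + k))) _ ?_) ?_
      · intro acc2 k hk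
        rw [List.mem_range] at hk
        dsimp only
        have hcast : ((x + 1 + k : Nat) : Int) + 1 = ((x + 1 + k + 1 : Nat) : Int) := by
          push_cast; ring
        rw [hcast, PySem.List.slice_natCast]
        by_cases hA : Anti cs x (x + 1 + k) = true
        · rw [if_pos ((cand_mirror cs x (x + 1 + k) (by omega) (by omega)).mpr hA)]
          simp [aind, hA]
        · rw [if_neg (fun h => hA ((cand_mirror cs x (x + 1 + k) (by omega) (by omega)).mp h))]
          simp [aind, Bool.eq_false_iff.mpr hA]
      · rw [PySem.List.foldl_add (g := fun k => aind (Anti cs x (x + 1 + k)))]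
        rfl
  · rw [PySem.List.foldl_add (g := G cs)]
    rw [zero_add]
    rfl

def row (t : List Char) (ℓ : Nat) : List Bool :=
  (List.range (t.length + 1 - ℓ)).map (fun a => Anti t a (a + ℓ - 1))

theorem row_zero (t : List Char) : row t 0 = List.replicate (t.length + 1) true := by
  rw [List.eq_replicate_iff]
  refine ⟨by simp [row], fun b hb => ?_⟩
  simp only [row, List.mem_map] at hb
  obtain ⟨a, -, rfl⟩ := hb
  rw [anti_iff]
  intro k hk hlt
  omega

theorem row_one (t : List Char) : row t 1 = List.replicate t.length true := by
  rw [List.eq_replicate_iff]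
  refine ⟨by simp [row], fun b hb => ?_⟩
  simp only [row, List.mem_map] at hb
  obtain ⟨a, -, rfl⟩ := hb
  rw [anti_iff]
  intro k hk hlt
  omega

theorem anti_succ (t : List Char) (a L : Nat) (hL : 2 ≤ L) :
    Anti t a (a + L - 1) = true ↔ (t[a]? ≠ t[a + L - 1]?) ∧ Anti t (a + 1) (a + L - 2) = true := by
  rw [anti_iff, anti_iff]
  constructor
  · intro h
    refine ⟨by simpa using h 0 (by omega) (by omega), fun k hk hlt => ?_⟩
    have := h (k + 1) (by omega) (by omega)
    have e1 : a + (k + 1) = a + 1 + k := by omega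
    have e2 : a + L - 1 - (k + 1) = a + L - 2 - k := by omega
    rwa [e1, e2] at this
  · rintro ⟨h0, h⟩ k hk hlt
    match k with
    | 0 => simpa using h0
    | Nat.succ m =>
      have := h m (by omega) (by omega)
      have e1 : a + (m + 1) = a + 1 + m := by omega
      have e2 : a + L - 1 - (m + 1) = a + L - 2 - m := by omega
      rwa [← e1, ← e2] at this

theorem step_row (t : List Char) (L : Nat) (hL : 2 ≤ L) (hLn : L ≤ t.length) :
    ((PySem.List.pyRange 0 ((t.length : Int) - (L : Int) + 1) 1).map (fun a =>
        (PySem.List.pyGetD t a ' ' != PySem.List.pyGetD t (a + (L : Int) - 1) ' ')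
          && PySem.List.pyGetD (row t (L - 2)) (a + 1) true)) = row t L := by
  rw [PySem.List.pyRange_zero, List.map_map]
  have hb : ((t.length : Int) - (L : Int) + 1).toNat = t.length + 1 - L := by omega
  rw [hb]
  unfold row
  apply List.map_congr_left
  intro a ha
  rw [List.mem_range] at ha
  simp only [Function.comp_apply]
  have c2 : ((a : Int) + (L : Int) - 1) = ((a + L - 1 : Nat) : Int) := by omega
  have c3 : ((a : Int) + 1) = ((a + 1 : Nat) : Int) := by omega
  rw [c2, c3, PySem.List.pyGetD_natCast, PySem.List.pyGetD_natCast, PySem.List.pyGetD_natCast]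
  rw [PySem.List.getD_map_range _ _ _ _ (by omega)]
  have c4 : a + 1 + (L - 2) - 1 = a + L - 2 := by omega
  rw [c4]
  have o1 : t[a]? = some (t[a]'(by omega)) := List.getElem?_eq_getElem (by omega)
  have o2 : t[a + L - 1]? = some (t[a + L - 1]'(by omega)) := List.getElem?_eq_getElem (by omega)
  have g1 : t.getD a ' ' = t[a]'(by omega) := List.getD_eq_getElem t ' ' (by omega)
  have g2 : t.getD (a + L - 1) ' ' = t[a + L - 1]'(by omega) := List.getD_eq_getElem t ' ' (by omega)
  rw [g1, g2, Bool.eq_iff_iff]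
  rw [anti_succ t a L hL]
  simp only [Bool.and_eq_true, bne_iff_ne, ne_eq, o1, o2, Option.some.injEq]

def rowSum (t : List Char) (ℓ : Nat) : Int :=
  ((row t ℓ).map (fun b => if b then (1 : Int) else 0)).sum

theorem rowSum_eq (t : List Char) (ℓ : Nat) :
    rowSum t ℓ = ∑ a ∈ Finset.range (t.length + 1 - ℓ), aind (Anti t a (a + ℓ - 1)) := by
  unfold rowSum row aind
  rw [List.map_map]
  rfl

theorem foldB (t : List Char) (m : Nat) (hm : m ≤ t.length - 1) :
    (List.range m).foldl
      (fun (st : Int × List Bool × List Bool) (i : Nat) =>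
        let cur := (PySem.List.pyRange 0 ((t.length : Int) - (2 + (i : Int)) + 1) 1).map (fun a =>
          (PySem.List.pyGetD t a ' ' != PySem.List.pyGetD t (a + (2 + (i : Int)) - 1) ' ')
            && PySem.List.pyGetD st.2.1 (a + 1) true)
        (st.1 + (cur.map (fun b => if b then (1 : Int) else 0)).sum, st.2.2, cur))
      (0, row t 0, row t 1)
    = (∑ i ∈ Finset.range m, rowSum t (2 + i), row t m, row t (m + 1)) := by
  induction m with
  | zero => simp
  | succ m ih =>
    rw [List.range_succ, List.foldl_append, ih (by omega), List.foldl_cons, List.foldl_nil]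
    have hc : (2 + (m : Int)) = ((m + 2 : Nat) : Int) := by push_cast; ring
    simp only [hc]
    have hrw : ((PySem.List.pyRange 0 ((t.length : Int) - ((m + 2 : Nat) : Int) + 1) 1).map (fun a =>
        (PySem.List.pyGetD t a ' ' != PySem.List.pyGetD t (a + ((m + 2 : Nat) : Int) - 1) ' ')
          && PySem.List.pyGetD (row t m) (a + 1) true)) = row t (m + 2) := by
      have := step_row t (m + 2) (by omega) (by omega)
      simpa using this
    rw [hrw]
    rw [Finset.sum_range_succ]
    have : 2 + m = m + 2 := by omega
    rw [this]
    rfl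

theorem count_alt_eq (s : String) :
    count_alt s = ∑ i ∈ Finset.range (s.toList.dropLast.length - 1), rowSum s.toList.dropLast (2 + i) := by
  simp only [count_alt]
  rw [PySem.List.slice_to_neg_one]
  set t := s.toList.dropLast with ht
  rw [PySem.List.pyRange_one, ← row_zero, ← row_one]
  have hb : (((t.length : Int) + 1) - 2).toNat = t.length - 1 := by omega
  rw [hb, List.foldl_map]
  have := foldB t (t.length - 1) (le_refl _)
  simp only [this]

theorem triangle_swap (M : Nat) (F : Nat → Nat → Int) :
    ∑ a ∈ Finset.range M, ∑ k ∈ Finset.range (M - a), F a k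
      = ∑ k ∈ Finset.range M, ∑ a ∈ Finset.range (M - k), F a k := by
  have h : ∀ (G : Nat → Nat → Int) (x : Nat), x < M →
      ∑ y ∈ Finset.range (M - x), G x y = ∑ y ∈ Finset.range M, if x + y < M then G x y else 0 := by
    intro G x hx
    have he : Finset.range (M - x) = (Finset.range M).filter (fun y => x + y < M) := by
      ext y
      simp only [Finset.mem_filter, Finset.mem_range]
      omega
    rw [he, Finset.sum_filter]
  rw [Finset.sum_congr rfl (fun x hx => h F x (Finset.mem_range.mp hx))]
  rw [Finset.sum_comm]
  refine Finset.sum_congr rfl (fun k hk => ?_)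
  rw [h (fun k a => F a k) k (Finset.mem_range.mp hk)]
  refine Finset.sum_congr rfl (fun a _ => ?_)
  simp only [Nat.add_comm k a]

theorem main_eq (s : String) : count s = count_alt s := by
  rw [count_eq_G, count_alt_eq]
  set cs := s.toList with hcs
  set t := cs.dropLast with ht
  have hnt : t.length = cs.length - 1 := by simp [ht]
  set M := t.length - 1 with hM
  -- LHS
  have hL : ∀ a ∈ Finset.range cs.length,
      G cs a = ∑ k ∈ Finset.range (M - a), aind (Anti t a (a + 1 + k)) := by
    intro a ha
    rw [Finset.mem_range] at ha
    unfold G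
    have hb : cs.length - 1 - (a + 1) = M - a := by omega
    rw [hb]
    refine Finset.sum_congr rfl (fun k hk => ?_)
    rw [Finset.mem_range] at hk
    exact (congrArg aind (anti_dropLast cs a (a + 1 + k) (by omega))).symm
  rw [Finset.sum_congr rfl hL]
  have htrunc : ∑ a ∈ Finset.range cs.length, ∑ k ∈ Finset.range (M - a), aind (Anti t a (a + 1 + k))
      = ∑ a ∈ Finset.range M, ∑ k ∈ Finset.range (M - a), aind (Anti t a (a + 1 + k)) := by
    have hsub : Finset.range M ⊆ Finset.range cs.length := (by intro x hx; simp only [Finset.mem_range] at *; omega)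
    have hzero : ∀ x ∈ Finset.range cs.length, x ∉ Finset.range M →
        ∑ k ∈ Finset.range (M - x), aind (Anti t x (x + 1 + k)) = 0 := by
      intro x _ hx
      rw [Finset.mem_range] at hx
      have h0 : M - x = 0 := by omega
      rw [h0]
      simp
    exact (Finset.sum_subset hsub hzero).symm
  rw [htrunc, triangle_swap]
  -- RHS
  refine Finset.sum_congr rfl (fun i hi => ?_)
  rw [Finset.mem_range] at hi
  rw [rowSum_eq]
  have hb : t.length + 1 - (2 + i) = M - i := by omega
  rw [hb]
  refine Finset.sum_congr rfl (fun a ha => ?_)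
  have he : a + (2 + i) - 1 = a + 1 + i := by omega
  rw [he]

-- ===== VERDICT (by name: the statement is the Claim_ definition above) =====
theorem count_spec : Claim_equal_count := by
  intro s _
  unfold Spec_count
  exact main_eq s
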